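-- pv_equiv track=rewrite | github.com/turbokirichenko/worktime | rsa copy.py | fn
-- ===== SOURCE A (Python) =====
-- def block(x1, x2, x3):
--     res = (x1 or x2 or (not x3)) and ((not x1) or (not x2) or x3)
--     return res
--
-- def C(x1, x2, x3, x4, x5, x6, x7, x8):
--     return block(x1, x2, x5) and block(x1, x3, x5) and block(x2, x3, x5) and \
--         block(x1, x2, x6) and block(x1, x4, x6) and block(x2, x4, x6) and \
--         block(x1, x3, x7) and block(x1, x4, x7) and block(x3, x4, x7) and \
--         block(x2, x3, x8) and block(x2, x4, x8) and block(x3, x4, x8)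
--
-- def fn(x1, x2, x3, x4):
--     for i in range(0, 16):
--         x8 = bool(i % 2)
--         x7 = bool(i//2 % 2)
--         x6 = bool(i//4 % 2)
--         x5 = bool(i//8 % 2)
--         if C(x1, x2, x3, x4, x5, x6, x7, x8) == True:
--             return f'{int(x1)}{int(x2)}{int(x3)}{int(x4)} {int(x5)}{int(x6)}{int(x7)}{int(x8)}'
--     return f'{int(x1)}{int(x2)}{int(x3)}{int(x4)} None'
-- ===== SOURCE B (Python) =====
-- def block(x1, x2, x3):
--     res = (x1 or x2 or (not x3)) and ((not x1) or (not x2) or x3)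
--     return res
--
-- def _pick(a, b, c):
--     # first value (False before True) satisfying the three blocks of one output variable
--     for v in (False, True):
--         if block(a, b, v) and block(a, c, v) and block(b, c, v):
--             return v
--     return None
--
-- def fn(x1, x2, x3, x4):
--     prefix = f'{int(x1)}{int(x2)}{int(x3)}{int(x4)}'
--     x5 = _pick(x1, x2, x3)
--     x6 = _pick(x1, x2, x4)
--     x7 = _pick(x1, x3, x4)
--     x8 = _pick(x2, x3, x4)
--     if None in (x5, x6, x7, x8):
--         return f'{prefix} None'
--     return f'{prefix} {int(x5)}{int(x6)}{int(x7)}{int(x8)}'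
-- ===== Notes on version B (the rewrite author's own statement) =====
-- stated objective: simpler
-- what changed: Replaces the 16-assignment brute-force enumeration with four independent per-variable searches (x5..x8 each depend only on their own three block constraints, tried False-first), then formats the result once.
import Mathlib
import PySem

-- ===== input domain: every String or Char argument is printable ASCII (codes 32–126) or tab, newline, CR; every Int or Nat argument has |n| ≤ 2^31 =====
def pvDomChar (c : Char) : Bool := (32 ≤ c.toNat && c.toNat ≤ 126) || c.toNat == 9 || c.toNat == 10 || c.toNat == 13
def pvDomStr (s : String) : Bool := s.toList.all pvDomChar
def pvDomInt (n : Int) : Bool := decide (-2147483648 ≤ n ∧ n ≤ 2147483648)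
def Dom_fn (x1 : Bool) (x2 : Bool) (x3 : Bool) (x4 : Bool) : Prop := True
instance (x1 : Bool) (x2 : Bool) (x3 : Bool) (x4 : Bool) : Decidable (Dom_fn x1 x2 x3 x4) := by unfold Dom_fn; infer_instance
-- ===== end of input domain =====

-- B replaces A's enumeration of all 16 assignments by four independent per-variable
-- searches (x5..x8 decouple), a simpler decomposition; objective: simpler.

-- ===== PORT A =====
-- block(x1, x2, x3)
def pyBlock (a b c : Bool) : Bool := (a || b || !c) && (!a || !b || c)

-- C(x1,…,x8)
def pyC (x1 x2 x3 x4 x5 x6 x7 x8 : Bool) : Bool :=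
  pyBlock x1 x2 x5 && pyBlock x1 x3 x5 && pyBlock x2 x3 x5 &&
  pyBlock x1 x2 x6 && pyBlock x1 x4 x6 && pyBlock x2 x4 x6 &&
  pyBlock x1 x3 x7 && pyBlock x1 x4 x7 && pyBlock x3 x4 x7 &&
  pyBlock x2 x3 x8 && pyBlock x2 x4 x8 && pyBlock x3 x4 x8

-- f'{int(b)}' for a Bool
def bitStr (b : Bool) : String := if b then "1" else "0"

-- the for-loop over range(0,16) with early return
def fn (x1 : Bool) (x2 : Bool) (x3 : Bool) (x4 : Bool) : String :=
  match (PySem.List.pyRange 0 16 1).findSome? (fun i =>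
    let x8 : Bool := decide (PySem.Int.mod i 2 ≠ 0)
    let x7 : Bool := decide (PySem.Int.mod (PySem.Int.floordiv i 2) 2 ≠ 0)
    let x6 : Bool := decide (PySem.Int.mod (PySem.Int.floordiv i 4) 2 ≠ 0)
    let x5 : Bool := decide (PySem.Int.mod (PySem.Int.floordiv i 8) 2 ≠ 0)
    if pyC x1 x2 x3 x4 x5 x6 x7 x8 = true then
      some (bitStr x1 ++ bitStr x2 ++ bitStr x3 ++ bitStr x4 ++ " " ++
            bitStr x5 ++ bitStr x6 ++ bitStr x7 ++ bitStr x8)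
    else none) with
  | some s => s
  | none => bitStr x1 ++ bitStr x2 ++ bitStr x3 ++ bitStr x4 ++ " None"

-- ===== PORT B =====
-- _pick(a, b, c): first value (False before True) satisfying the variable's three blocks
def pick (a b c : Bool) : Option Bool :=
  [false, true].find? (fun v => pyBlock a b v && pyBlock a c v && pyBlock b c v)

def fn_alt (x1 : Bool) (x2 : Bool) (x3 : Bool) (x4 : Bool) : String :=
  let prefx := bitStr x1 ++ bitStr x2 ++ bitStr x3 ++ bitStr x4
  match pick x1 x2 x3, pick x1 x2 x4, pick x1 x3 x4, pick x2 x3 x4 with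
  | some x5, some x6, some x7, some x8 =>
      prefx ++ " " ++ bitStr x5 ++ bitStr x6 ++ bitStr x7 ++ bitStr x8
  | _, _, _, _ => prefx ++ " None"

-- ===== PRECONDITION & SPEC =====
def Spec_fn (x1 : Bool) (x2 : Bool) (x3 : Bool) (x4 : Bool) (out : String) : Prop := out = fn_alt x1 x2 x3 x4
instance (x1 : Bool) (x2 : Bool) (x3 : Bool) (x4 : Bool) (out : String) : Decidable (Spec_fn x1 x2 x3 x4 out) := by unfold Spec_fn; infer_instance

-- ===== CLAIM (what is proved, stated in full; the proofs are below) =====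
def Claim_equal_fn : Prop := ∀ (x1 : Bool) (x2 : Bool) (x3 : Bool) (x4 : Bool), Dom_fn x1 x2 x3 x4 → Spec_fn x1 x2 x3 x4 (fn x1 x2 x3 x4)

-- ===== LEMMAS AND PROOFS =====

-- ===== VERDICT (by name: the statement is the Claim_ definition above) =====
theorem fn_spec : Claim_equal_fn := by
  unfold Claim_equal_fn Spec_fn
  decide
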